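-- pv_equiv track=rewrite | github.com/afewcps/F1-Prediction-Chart | generate_chartOLD.py | count_predictions
-- ===== SOURCE A (Python) =====
-- def count_predictions(results):
--     correct = 0
--     wrong = 0
--     for page in results:
--         props = page["properties"]
--         # Annahme: Die Eigenschaft heißt "Prediction" und ist vom Typ number
--         prediction_value = props.get("Prediction", {}).get("number")
--         if prediction_value is None:
--             continue
--
--         # Annahme: prediction_value ist Anzahl der richtigen Predictions
--         # Beispiel: richtig = prediction_value, falsch = (3 - prediction_value) wenn max 3 Predictions pro Rennen
--         correct += prediction_value
--         wrong += (3 - prediction_value)  # Anpassen, falls anders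
--
--     return correct, wrong
-- ===== SOURCE B (Python) =====
-- def count_predictions(results):
--     counts = {}
--     for page in results:
--         v = page["properties"].get("Prediction", {}).get("number")
--         if v is not None:
--             counts[v] = counts.get(v, 0) + 1
--     correct = sum(v * c for v, c in counts.items())
--     total = sum(counts.values())
--     return correct, 3 * total - correct
-- ===== Notes on version B (the rewrite author's own statement) =====
-- stated objective: alternative
-- what changed: Replaces A's pair of running accumulators by a frequency dictionary of the valid prediction values built in one pass; correct is then derived from the histogram as sum(v*count) over distinct values and wrong in closed form as 3*total - correct.
import Mathlib
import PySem

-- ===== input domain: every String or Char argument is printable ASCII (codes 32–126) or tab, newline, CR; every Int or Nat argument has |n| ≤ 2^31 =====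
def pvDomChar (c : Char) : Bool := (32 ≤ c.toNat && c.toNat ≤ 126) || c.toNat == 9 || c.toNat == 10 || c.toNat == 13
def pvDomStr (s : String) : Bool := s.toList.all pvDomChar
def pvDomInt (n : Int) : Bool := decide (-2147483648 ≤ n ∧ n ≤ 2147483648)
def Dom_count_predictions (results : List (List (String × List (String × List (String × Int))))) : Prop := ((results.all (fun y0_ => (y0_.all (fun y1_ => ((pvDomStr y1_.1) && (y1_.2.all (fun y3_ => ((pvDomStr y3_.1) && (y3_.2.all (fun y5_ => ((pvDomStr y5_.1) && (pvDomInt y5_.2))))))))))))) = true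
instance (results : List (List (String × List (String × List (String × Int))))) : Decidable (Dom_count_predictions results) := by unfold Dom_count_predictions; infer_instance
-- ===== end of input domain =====

-- B replaces A's dual running accumulators by a frequency dictionary (counter) of the valid prediction values, deriving correct = Σ v·count(v) over the table and wrong = 3·total − correct (objective: alternative).


-- association-list lookup, first match (dict lookup under the type convention)
def pyLookup {α : Type} (d : List (String × α)) (k : String) : Option α :=
  (d.find? (fun kv => kv.1 == k)).map (·.2)

-- ===== PORT A =====
def count_predictions (results : List (List (String × List (String × List (String × Int))))) : Int × Int :=
  results.foldl
    (fun cw page =>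
      match pyLookup page "properties" with
      | none => cw      -- Python raises KeyError here; excluded by Pre_
      | some props =>
        match pyLookup ((pyLookup props "Prediction").getD []) "number" with
        | none => cw    -- prediction_value is None: continue
        | some v => (cw.1 + v, cw.2 + (3 - v)))
    (0, 0)

-- ===== PORT B =====
-- props.get("Prediction", {}).get("number") of a page (none = missing "properties" key: KeyError, excluded by Pre_)
def predVal? (page : List (String × List (String × List (String × Int)))) : Option Int :=
  match pyLookup page "properties" with
  | none => none
  | some props => pyLookup ((pyLookup props "Prediction").getD []) "number"

def count_predictions_alt (results : List (List (String × List (String × List (String × Int))))) : Int × Int :=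
  let counts : PySem.Dict Int Int :=
    results.foldl
      (fun d page =>
        match predVal? page with
        | none => d
        | some v => d.insert v (d.getD v 0 + 1))
      PySem.Dict.empty
  let correct := (counts.items.map (fun p => p.1 * p.2)).sum
  let total := counts.values.sum
  (correct, 3 * total - correct)

-- ===== PRECONDITION & SPEC =====
-- Pre_ excludes pages lacking the key "properties": there both Pythons raise KeyError.
def Pre_count_predictions (results : List (List (String × List (String × List (String × Int))))) : Prop :=
  (results.all (fun page => (pyLookup page "properties").isSome)) = true
instance (results : List (List (String × List (String × List (String × Int))))) : Decidable (Pre_count_predictions results) := by unfold Pre_count_predictions; infer_instance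

def pvWitness_count_predictions : (List (List (String × List (String × List (String × Int))))) :=
  [[("properties", [("Prediction", [("number", 2)])])], [("properties", [])]]

def Spec_count_predictions (results : List (List (String × List (String × List (String × Int))))) (out : Int × Int) : Prop := out = count_predictions_alt results
instance (results : List (List (String × List (String × List (String × Int))))) (out : Int × Int) : Decidable (Spec_count_predictions results out) := by unfold Spec_count_predictions; infer_instance

-- ===== CLAIM =====
def Claim_equal_count_predictions : Prop := ∀ (results : List (List (String × List (String × List (String × Int))))), Dom_count_predictions results → Pre_count_predictions results → Spec_count_predictions results (count_predictions results)

-- ===== LEMMAS AND PROOFS =====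

-- A's fold from an arbitrary accumulator, via the list of valid values.
theorem countA_fold (results : List (List (String × List (String × List (String × Int)))))
    (c w : Int) :
    results.foldl
      (fun cw page =>
        match pyLookup page "properties" with
        | none => cw
        | some props =>
          match pyLookup ((pyLookup props "Prediction").getD []) "number" with
          | none => cw
          | some v => (cw.1 + v, cw.2 + (3 - v)))
      (c, w)
    = (c + (results.filterMap predVal?).sum,
       w + (3 * (results.filterMap predVal?).length - (results.filterMap predVal?).sum)) := by
  induction results generalizing c w with
  | nil => simp
  | cons page rest ih =>
    have hstep : (fun (cw : Int × Int) (page : List (String × List (String × List (String × Int)))) =>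
        match pyLookup page "properties" with
        | none => cw
        | some props =>
          match pyLookup ((pyLookup props "Prediction").getD []) "number" with
          | none => cw
          | some v => (cw.1 + v, cw.2 + (3 - v))) (c, w) page
        = match predVal? page with
          | none => (c, w)
          | some v => (c + v, w + (3 - v)) := by
      unfold predVal?
      cases h1 : pyLookup page "properties" with
      | none => simp only [h1]
      | some props =>
        cases h2 : pyLookup ((pyLookup props "Prediction").getD []) "number" <;>
          simp only [h1, h2]
    simp only [List.foldl_cons, hstep, List.filterMap_cons]
    cases h : predVal? page with
    | none => simp [ih]
    | some v =>
      simp only [ih, List.sum_cons, List.length_cons, Prod.mk.injEq]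
      refine ⟨by ring, ?_⟩
      push_cast
      ring

-- B's dict-building loop over pages equals the counter loop over the valid-value list.
theorem countB_fold (results : List (List (String × List (String × List (String × Int)))))
    (d : PySem.Dict Int Int) :
    results.foldl
      (fun d page =>
        match predVal? page with
        | none => d
        | some v => d.insert v (d.getD v 0 + 1))
      d
    = (results.filterMap predVal?).foldl (fun d x => d.insert x (d.getD x 0 + 1)) d := by
  induction results generalizing d with
  | nil => rfl
  | cons page rest ih =>
    simp only [List.foldl_cons, List.filterMap_cons]
    cases h : predVal? page <;> simp [h, ih]

theorem sum_map_add_int (d : List Int) (f g : Int → Int) :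
    (d.map (fun k => f k + g k)).sum = (d.map f).sum + (d.map g).sum := by
  induction d with
  | nil => simp
  | cons a t ih => simp [ih]; ring

theorem sum_ite_self (x : Int) (d : List Int) (hx : x ∈ d) (hnd : d.Nodup) :
    (d.map (fun k => if x = k then k else 0)).sum = x := by
  induction d with
  | nil => cases hx
  | cons a t ih =>
    rcases List.mem_cons.mp hx with h | h
    · subst h
      have ht : (t.map (fun k => if x = k then k else 0)).sum = 0 := by
        apply List.sum_eq_zero
        intro y hy
        obtain ⟨k, hk, rfl⟩ := List.mem_map.mp hy
        have : x ≠ k := fun e => (List.nodup_cons.mp hnd).1 (e ▸ hk)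
        simp [this]
      simp [ht]
    · have hne : x ≠ a := fun e => (List.nodup_cons.mp hnd).1 (e ▸ h)
      simp [hne, ih h (List.nodup_cons.mp hnd).2]

theorem sum_ite_one (x : Int) (d : List Int) (hx : x ∈ d) (hnd : d.Nodup) :
    (d.map (fun k => if x = k then (1:Int) else 0)).sum = 1 := by
  induction d with
  | nil => cases hx
  | cons a t ih =>
    rcases List.mem_cons.mp hx with h | h
    · subst h
      have ht : (t.map (fun k => if x = k then (1:Int) else 0)).sum = 0 := by
        apply List.sum_eq_zero
        intro y hy
        obtain ⟨k, hk, rfl⟩ := List.mem_map.mp hy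
        have : x ≠ k := fun e => (List.nodup_cons.mp hnd).1 (e ▸ hk)
        simp [this]
      simp [ht]
    · have hne : x ≠ a := fun e => (List.nodup_cons.mp hnd).1 (e ▸ h)
      simp [hne, ih h (List.nodup_cons.mp hnd).2]

-- Σ_{k ∈ d} k * vs.count k = vs.sum, for d nodup covering vs.
theorem sum_mul_count (d : List Int) (hnd : d.Nodup) :
    ∀ vs : List Int, (∀ x ∈ vs, x ∈ d) →
      (d.map (fun k => k * (vs.count k : Int))).sum = vs.sum := by
  intro vs
  induction vs with
  | nil => intro _; simp
  | cons x t ih =>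
    intro hcov
    have hx : x ∈ d := hcov x (List.mem_cons_self ..)
    have heq : (fun k => k * (((x :: t).count k : Int))) =
        (fun k => k * (t.count k : Int) + (if x = k then k else 0)) := by
      funext k
      by_cases h : x = k <;> simp [List.count_cons, h] <;> push_cast <;> ring
    rw [heq, sum_map_add_int, ih (fun y hy => hcov y (List.mem_cons_of_mem _ hy)),
        sum_ite_self x d hx hnd]
    simp [add_comm]

-- Σ_{k ∈ d} vs.count k = vs.length, for d nodup covering vs.
theorem sum_count (d : List Int) (hnd : d.Nodup) :
    ∀ vs : List Int, (∀ x ∈ vs, x ∈ d) →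
      (d.map (fun k => (vs.count k : Int))).sum = vs.length := by
  intro vs
  induction vs with
  | nil => intro _; simp
  | cons x t ih =>
    intro hcov
    have hx : x ∈ d := hcov x (List.mem_cons_self ..)
    have heq : (fun k => (((x :: t).count k : Int))) =
        (fun k => (t.count k : Int) + (if x = k then (1:Int) else 0)) := by
      funext k
      by_cases h : x = k <;> simp [List.count_cons, h]
    rw [heq, sum_map_add_int, ih (fun y hy => hcov y (List.mem_cons_of_mem _ hy)),
        sum_ite_one x d hx hnd]
    simp [List.length_cons]

-- ===== VERDICT =====
theorem count_predictions_spec : Claim_equal_count_predictions := by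
  intro results _ _
  show count_predictions results = count_predictions_alt results
  unfold count_predictions count_predictions_alt
  rw [countA_fold, countB_fold, PySem.Dict.foldl_insert_getD_add_one_eq_counter,
]
  set vs := results.filterMap predVal? with hvs
  have hnd : (PySem.Set.ofList vs).Nodup := PySem.Set.nodup_ofList vs
  have hcov : ∀ x ∈ vs, x ∈ PySem.Set.ofList vs := fun x hx => by
    simpa [PySem.Set.mem_ofList] using hx
  have h1 := sum_mul_count (PySem.Set.ofList vs) hnd vs hcov
  have h2 := sum_count (PySem.Set.ofList vs) hnd vs hcov
  simp [PySem.Dict.items_counter, PySem.Dict.values, List.map_map, Function.comp_def, h1, h2]
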